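-- pv_equiv track=rewrite | github.com/KorolDz/AI-detection-in-music-and-video | media_security/extractors/video.py | _infer_device_make
-- ===== SOURCE A (Python) =====
-- def _infer_device_make(source_device_name: str | None, device_model: str | None) -> str | None:
--     candidates = " ".join(item for item in [source_device_name or "", device_model or ""]).lower()
--     if not candidates:
--         return None
--     if "galaxy" in candidates or "samsung" in candidates or "sm-" in candidates:
--         return "Samsung"
--     if "iphone" in candidates or "apple" in candidates:
--         return "Apple"
--     if "pixel" in candidates or "google" in candidates:
--         return "Google"
--     return None
-- ===== SOURCE B (Python) =====
-- _TABLE = [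
--     ("Samsung", ("galaxy", "samsung", "sm-")),
--     ("Apple", ("iphone", "apple")),
--     ("Google", ("pixel", "google")),
-- ]
--
--
-- def _infer_device_make(source_device_name, device_model):
--     # Single left-to-right positional scan: at each index test which keywords
--     # start there, collect every matched brand, then pick by priority order.
--     text = ((source_device_name or "") + " " + (device_model or "")).lower()
--     found = set()
--     for i in range(len(text)):
--         for brand, keywords in _TABLE:
--             if any(text.startswith(kw, i) for kw in keywords):
--                 found.add(brand)
--     for brand, _ in _TABLE:
--         if brand in found:
--             return brand
--     return None
-- ===== Notes on version B (the rewrite author's own statement) =====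
-- stated objective: alternative
-- what changed: Replaces A's short-circuiting if/or chain of substring ('in') tests by a single positional scan of the lowered text that collects every brand whose keyword starts at some index into a set, followed by a separate priority-selection pass over the brand table.
import Mathlib
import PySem

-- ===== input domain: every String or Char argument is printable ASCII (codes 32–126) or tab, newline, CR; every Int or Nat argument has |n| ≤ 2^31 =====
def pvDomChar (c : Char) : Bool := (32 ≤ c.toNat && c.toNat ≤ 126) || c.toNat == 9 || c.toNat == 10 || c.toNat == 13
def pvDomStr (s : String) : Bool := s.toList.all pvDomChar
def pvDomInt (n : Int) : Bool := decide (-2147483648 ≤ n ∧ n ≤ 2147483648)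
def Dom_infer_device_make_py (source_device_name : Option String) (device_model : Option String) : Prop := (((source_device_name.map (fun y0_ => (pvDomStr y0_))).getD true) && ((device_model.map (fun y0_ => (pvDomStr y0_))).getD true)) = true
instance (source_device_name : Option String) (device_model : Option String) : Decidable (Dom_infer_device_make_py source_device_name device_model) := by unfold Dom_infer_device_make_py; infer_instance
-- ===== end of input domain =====

-- B replaces A's short-circuiting if/or chain of substring tests by a positional scan that
-- collects all matched brands into a set, then a priority-selection pass (alternative).


-- ===== PORT A =====
def infer_device_make_py (source_device_name : Option String) (device_model : Option String) : Option String :=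
  let candidates := PySem.Str.lower (PySem.Str.join " " [source_device_name.getD "", device_model.getD ""])
  if candidates = "" then none
  else if PySem.Str.isIn "galaxy" candidates || PySem.Str.isIn "samsung" candidates || PySem.Str.isIn "sm-" candidates then some "Samsung"
  else if PySem.Str.isIn "iphone" candidates || PySem.Str.isIn "apple" candidates then some "Apple"
  else if PySem.Str.isIn "pixel" candidates || PySem.Str.isIn "google" candidates then some "Google"
  else none

-- ===== PORT B =====
def pvTable : List (String × List String) :=
  [("Samsung", ["galaxy", "samsung", "sm-"]),
   ("Apple", ["iphone", "apple"]),
   ("Google", ["pixel", "google"])]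

-- port of text.startswith(kw, i) for 0 ≤ i ≤ len(text): exact, prefix test on the drop
def pvHit (chars : List Char) (kws : List String) (i : Nat) : Bool :=
  kws.any (fun kw => PySem.Chars.startswith (chars.drop i) kw.toList)

-- the inner 'for brand, keywords in _TABLE' body of the scan loop
def pvScanStep (chars : List Char) (acc : PySem.Set String) (i : Nat) : PySem.Set String :=
  pvTable.foldl (fun acc bk => if pvHit chars bk.2 i then PySem.Set.add acc bk.1 else acc) acc

-- the final 'for brand, _ in _TABLE: if brand in found: return brand' loop
def pvPick (found : PySem.Set String) : List (String × List String) → Option String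
  | [] => none
  | bk :: rest => if PySem.Set.contains found bk.1 then some bk.1 else pvPick found rest

def infer_device_make_py_alt (source_device_name : Option String) (device_model : Option String) : Option String :=
  let text := PySem.Str.lower ((source_device_name.getD "") ++ " " ++ (device_model.getD ""))
  let chars := text.toList
  -- for i in range(len(text)): indices 0..len-1 in order
  let found := (List.range chars.length).foldl (pvScanStep chars) PySem.Set.empty
  pvPick found pvTable

-- ===== PRECONDITION & SPEC =====
def Spec_infer_device_make_py (source_device_name : Option String) (device_model : Option String) (out : Option String) : Prop := out = infer_device_make_py_alt source_device_name device_model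
instance (source_device_name : Option String) (device_model : Option String) (out : Option String) : Decidable (Spec_infer_device_make_py source_device_name device_model out) := by unfold Spec_infer_device_make_py; infer_instance

-- ===== CLAIM (what is proved, stated in full; the proofs are below) =====
def Claim_equal_infer_device_make_py : Prop := ∀ (source_device_name : Option String) (device_model : Option String), Dom_infer_device_make_py source_device_name device_model → Spec_infer_device_make_py source_device_name device_model (infer_device_make_py source_device_name device_model)

-- ===== LEMMAS AND PROOFS =====

-- membership in a conditional add
theorem pv_mem_condAdd (s : PySem.Set String) (c : Bool) (x b : String) :
    b ∈ (if c then PySem.Set.add s x else s) ↔ (b ∈ s ∨ (c ∧ b = x)) := by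
  cases c <;> simp [PySem.Set.mem_add]

-- membership after one scan step
theorem pv_mem_scanStep (chars : List Char) (acc : PySem.Set String) (i : Nat) (b : String) :
    b ∈ pvScanStep chars acc i ↔
      b ∈ acc ∨ (pvHit chars ["galaxy", "samsung", "sm-"] i ∧ b = "Samsung")
        ∨ (pvHit chars ["iphone", "apple"] i ∧ b = "Apple")
        ∨ (pvHit chars ["pixel", "google"] i ∧ b = "Google") := by
  simp only [pvScanStep, pvTable, List.foldl_cons, List.foldl_nil, pv_mem_condAdd, or_assoc]

-- membership in the accumulated set over any index list
theorem pv_mem_scan (chars : List Char) (l : List Nat) (acc : PySem.Set String) (b : String) :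
    b ∈ l.foldl (pvScanStep chars) acc ↔
      b ∈ acc ∨ ((∃ i ∈ l, pvHit chars ["galaxy", "samsung", "sm-"] i) ∧ b = "Samsung")
        ∨ ((∃ i ∈ l, pvHit chars ["iphone", "apple"] i) ∧ b = "Apple")
        ∨ ((∃ i ∈ l, pvHit chars ["pixel", "google"] i) ∧ b = "Google") := by
  induction l generalizing acc with
  | nil => simp
  | cons j t ih =>
    simp only [List.foldl_cons, ih, pv_mem_scanStep, List.mem_cons]
    constructor
    · rintro ((h | ⟨h, rfl⟩ | ⟨h, rfl⟩ | ⟨h, rfl⟩) | ⟨⟨i, hi, h⟩, rfl⟩ | ⟨⟨i, hi, h⟩, rfl⟩ | ⟨⟨i, hi, h⟩, rfl⟩)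
      · exact Or.inl h
      · exact Or.inr (Or.inl ⟨⟨j, Or.inl rfl, h⟩, rfl⟩)
      · exact Or.inr (Or.inr (Or.inl ⟨⟨j, Or.inl rfl, h⟩, rfl⟩))
      · exact Or.inr (Or.inr (Or.inr ⟨⟨j, Or.inl rfl, h⟩, rfl⟩))
      · exact Or.inr (Or.inl ⟨⟨i, Or.inr hi, h⟩, rfl⟩)
      · exact Or.inr (Or.inr (Or.inl ⟨⟨i, Or.inr hi, h⟩, rfl⟩))
      · exact Or.inr (Or.inr (Or.inr ⟨⟨i, Or.inr hi, h⟩, rfl⟩))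
    · rintro (h | ⟨⟨i, hi | hi, h⟩, rfl⟩ | ⟨⟨i, hi | hi, h⟩, rfl⟩ | ⟨⟨i, hi | hi, h⟩, rfl⟩)
      · exact Or.inl (Or.inl h)
      · exact Or.inl (Or.inr (Or.inl ⟨hi ▸ h, rfl⟩))
      · exact Or.inr (Or.inl ⟨⟨i, hi, h⟩, rfl⟩)
      · exact Or.inl (Or.inr (Or.inr (Or.inl ⟨hi ▸ h, rfl⟩)))
      · exact Or.inr (Or.inr (Or.inl ⟨⟨i, hi, h⟩, rfl⟩))
      · exact Or.inl (Or.inr (Or.inr (Or.inr ⟨hi ▸ h, rfl⟩)))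
      · exact Or.inr (Or.inr (Or.inr ⟨⟨i, hi, h⟩, rfl⟩))

-- a nonempty keyword is an infix iff it starts at some index < length
theorem pv_infix_iff_hit (kw chars : List Char) (hk : kw ≠ []) :
    kw <:+: chars ↔ ∃ i ∈ List.range chars.length, PySem.Chars.startswith (chars.drop i) kw := by
  simp only [List.mem_range, PySem.Chars.startswith_iff]
  constructor
  · rintro ⟨s, t, rfl⟩
    refine ⟨s.length, ?_, ?_⟩
    · have : 0 < kw.length := List.length_pos_iff.mpr hk
      simp; omega
    · simp [List.drop_left']
  · rintro ⟨i, _, h⟩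
    exact h.isInfix.trans (List.drop_suffix i chars).isInfix

-- existence of a hit for a keyword list = some keyword starts at i
theorem pv_hit_iff (chars : List Char) (kws : List String) (i : Nat) :
    pvHit chars kws i = true ↔ ∃ kw ∈ kws, PySem.Chars.startswith (chars.drop i) kw.toList := by
  simp [pvHit]

-- the two candidate strings have the same character list
theorem pv_same_chars (s1 s2 : String) :
    (PySem.Str.lower (PySem.Str.join " " [s1, s2])).toList =
      (PySem.Str.lower (s1 ++ " " ++ s2)).toList := by
  simp [PySem.Str.toList_lower, PySem.Chars.join, List.intercalate]

-- the joined candidate string is never empty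
theorem pv_lower_join_ne_empty (s1 s2 : String) :
    PySem.Str.lower (PySem.Str.join " " [s1, s2]) ≠ "" := by
  intro h
  have h2 := congrArg String.toList h
  rw [PySem.Str.toList_lower] at h2
  simp [PySem.Chars.join, List.intercalate, PySem.Chars.lower] at h2

-- A's isIn test on the candidates equals "some index hits kw" on B's char list
theorem pv_isIn_iff (kw s1 s2 : String) (hk : kw.toList ≠ []) :
    PySem.Str.isIn kw (PySem.Str.lower (PySem.Str.join " " [s1, s2])) = true ↔
      ∃ i ∈ List.range (PySem.Str.lower (s1 ++ " " ++ s2)).toList.length,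
        PySem.Chars.startswith ((PySem.Str.lower (s1 ++ " " ++ s2)).toList.drop i) kw.toList := by
  rw [PySem.Str.isIn_eq, ← pv_same_chars s1 s2, PySem.Chars.isIn_iff_infix,
    pv_infix_iff_hit _ _ hk, pv_same_chars s1 s2]

-- the core equivalence, for arbitrary option arguments
theorem pv_core (source_device_name device_model : Option String) :
    infer_device_make_py source_device_name device_model =
      infer_device_make_py_alt source_device_name device_model := by
  unfold infer_device_make_py infer_device_make_py_alt
  generalize source_device_name.getD "" = s1
  generalize device_model.getD "" = s2
  rw [if_neg (pv_lower_join_ne_empty s1 s2)]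
  set cand := PySem.Str.lower (PySem.Str.join " " [s1, s2]) with hcand
  set chars := (PySem.Str.lower (s1 ++ " " ++ s2)).toList with hchars
  have hmem : ∀ b : String, PySem.Set.contains ((List.range chars.length).foldl (pvScanStep chars) PySem.Set.empty) b = true ↔
      ((∃ i ∈ List.range chars.length, pvHit chars ["galaxy", "samsung", "sm-"] i) ∧ b = "Samsung")
        ∨ ((∃ i ∈ List.range chars.length, pvHit chars ["iphone", "apple"] i) ∧ b = "Apple")
        ∨ ((∃ i ∈ List.range chars.length, pvHit chars ["pixel", "google"] i) ∧ b = "Google") := by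
    intro b
    rw [PySem.Set.contains_iff, pv_mem_scan]
    simp [PySem.Set.empty]
  have hhit : ∀ (kws : List String), (∀ kw ∈ kws, kw.toList ≠ []) →
      ((∃ i ∈ List.range chars.length, pvHit chars kws i) ↔
        ∃ kw ∈ kws, PySem.Str.isIn kw cand = true) := by
    intro kws hne
    constructor
    · rintro ⟨i, hi, h⟩
      rw [pv_hit_iff] at h
      obtain ⟨kw, hkw, hsw⟩ := h
      exact ⟨kw, hkw, (pv_isIn_iff kw s1 s2 (hne kw hkw)).mpr ⟨i, hi, hsw⟩⟩
    · rintro ⟨kw, hkw, h⟩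
      obtain ⟨i, hi, hsw⟩ := (pv_isIn_iff kw s1 s2 (hne kw hkw)).mp h
      exact ⟨i, hi, (pv_hit_iff chars kws i).mpr ⟨kw, hkw, hsw⟩⟩
  have hS : PySem.Set.contains ((List.range chars.length).foldl (pvScanStep chars) PySem.Set.empty) "Samsung"
      = (PySem.Str.isIn "galaxy" cand || PySem.Str.isIn "samsung" cand || PySem.Str.isIn "sm-" cand) := by
    rw [Bool.eq_iff_iff, hmem, hhit ["galaxy", "samsung", "sm-"] (by decide)]
    simp [or_assoc]
  have hA : PySem.Set.contains ((List.range chars.length).foldl (pvScanStep chars) PySem.Set.empty) "Apple"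
      = (PySem.Str.isIn "iphone" cand || PySem.Str.isIn "apple" cand) := by
    rw [Bool.eq_iff_iff, hmem, hhit ["iphone", "apple"] (by decide)]
    simp
  have hG : PySem.Set.contains ((List.range chars.length).foldl (pvScanStep chars) PySem.Set.empty) "Google"
      = (PySem.Str.isIn "pixel" cand || PySem.Str.isIn "google" cand) := by
    rw [Bool.eq_iff_iff, hmem, hhit ["pixel", "google"] (by decide)]
    simp
  simp only [pvPick, pvTable, ← hchars, hS, hA, hG]

-- ===== VERDICT (by name: the statement is the Claim_ definition above) =====
theorem infer_device_make_py_spec : Claim_equal_infer_device_make_py := by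
  intro n m _
  exact pv_core n m
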